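-- pv_equiv track=rewrite | github.com/ZGaillard/IFT2125_Devoir4 | parenthesage.py | fillTable
-- ===== SOURCE A (Python) =====
-- def multiply(x, y):
--     # x and y are characters, we use a trick to get the index
--     # of the character in the alphabet (a=0, b=1, c=2)
--     i = ord(x) - 97
--     j = ord(y) - 97
--     mult_table = [
--         ["c", "c", "a"],
--         ["c", "b", "a"],
--         ["a", "c", "b"]
--     ]
--     return mult_table[i][j]
--
-- def lookup(string_a, string_b):
--     string_res = ""
--     for charA in string_a:
--         for charB in string_b:
--             char_res = multiply(charA, charB)
--             if not string_res.__contains__(char_res):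
--                 string_res += char_res
--     return string_res
--
-- def getDelta(s):
--     res = []
--     for i in range(1, s + 1):
--         j = s + 1 - i
--         res += [[i, j]]
--     return res
--
-- def initTable(x):
--     n = len(x)
--     t = [["" for _ in range(0, n)] for _ in range(0, n)]
--     for i in range(0, n):
--         t[i][i] = x[i]
--     return t
--
-- def fillTable(x):
--     n = len(x)
--     t = initTable(x)
--     for s in range(1, n):
--         delta = getDelta(s)
--         for i in range(0, n - s):
--             j = s + i
--             for d in delta:
--                 z = t[i][j]
--                 z_prime = lookup(t[i][j - d[1]], t[i + d[0]][j])
--                 res = z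
--                 for char in z_prime:  # This loop runs in O(3)
--                     # because the length of z_prime is always <= 3
--                     if not z.__contains__(char):
--                         res += char
--                 t[i][j] = res
--     return t
-- ===== SOURCE B (Python) =====
-- MULT_TABLE = [
--     ["c", "c", "a"],
--     ["c", "b", "a"],
--     ["a", "c", "b"],
-- ]
--
-- def fillTable(x):
--     n = len(x)
--     memo = {}
--
--     def combine(sa, sb):
--         out = ""
--         for a in sa:
--             for b in sb:
--                 r = MULT_TABLE[ord(a) - 97][ord(b) - 97]
--                 if r not in out:
--                     out += r
--         return out
--
--     def solve(i, j):
--         if (i, j) in memo: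
--             return memo[(i, j)]
--         if i == j:
--             res = x[i]
--         else:
--             res = ""
--             for k in range(i, j):
--                 piece = combine(solve(i, k), solve(k + 1, j))
--                 res += "".join(c for c in piece if c not in res)
--         memo[(i, j)] = res
--         return res
--
--     return [[solve(i, j) if i <= j else "" for j in range(n)] for i in range(n)]
-- ===== Notes on version B (the rewrite author's own statement) =====
-- stated objective: simpler
-- what changed: Replaces A's bottom-up length-stratified table filling (building a delta split list per length and repeatedly re-reading/re-writing each table cell) with a top-down memoized recursion solve(i,j) that folds over split points directly; the delta lists and the incremental cell rewrites disappear.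
import Mathlib
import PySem

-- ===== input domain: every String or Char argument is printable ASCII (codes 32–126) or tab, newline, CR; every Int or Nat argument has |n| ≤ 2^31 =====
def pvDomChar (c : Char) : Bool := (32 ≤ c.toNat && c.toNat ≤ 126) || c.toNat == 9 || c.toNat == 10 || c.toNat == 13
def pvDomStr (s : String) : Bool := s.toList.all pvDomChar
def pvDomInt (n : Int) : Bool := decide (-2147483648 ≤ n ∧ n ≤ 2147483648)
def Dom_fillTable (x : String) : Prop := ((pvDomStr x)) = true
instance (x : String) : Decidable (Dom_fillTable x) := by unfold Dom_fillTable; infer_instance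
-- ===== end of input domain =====

-- B replaces A's bottom-up length-stratified table filling (with its per-length delta
-- list) by top-down memoized recursion on the cell (i, j); same return value, the
-- mutation of no argument is involved.  Objective: simpler.

-- ===== PORT A =====

-- multiply: mult_table[ord(x)-97][ord(y)-97]; pyGet? models Python list indexing
-- (negative wraparound); none = IndexError, excluded by Pre_, default never observed.
def multA (a b : Char) : Char :=
  let i : Int := (a.toNat : Int) - 97
  let j : Int := (b.toNat : Int) - 97
  let mult_table : List (List Char) := [['c','c','a'],['c','b','a'],['a','c','b']]
  (((PySem.List.pyGet? mult_table i).bind (fun row => PySem.List.pyGet? row j)).getD 'a')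

-- lookup: Python strings carried as List Char (each += appends one char)
def lookupA (sa sb : List Char) : List Char :=
  sa.foldl (fun acc cA =>
    sb.foldl (fun acc cB =>
      let r := multA cA cB
      if acc.contains r then acc else acc ++ [r]) acc) []

-- getDelta: range(1, s+1) rendered as List.range' 1 s (all values nonnegative)
def getDeltaA (s : Nat) : List (Nat × Nat) :=
  (List.range' 1 s).foldl (fun res i => res ++ [(i, s + 1 - i)]) []

def get2 (t : List (List (List Char))) (i j : Nat) : List Char := (t.getD i []).getD j []

def set2 (t : List (List (List Char))) (i j : Nat) (v : List Char) : List (List (List Char)) :=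
  t.set i ((t.getD i []).set j v)

def initTableA (cs : List Char) (n : Nat) : List (List (List Char)) :=
  let t := (List.range n).map (fun _ => (List.range n).map (fun _ => ([] : List Char)))
  (List.range n).foldl (fun t i => set2 t i i [cs.getD i ' ']) t

def fillTable (x : String) : List (List String) :=
  let cs := x.toList
  let n := cs.length
  let t0 := initTableA cs n
  let t := (List.range' 1 (n - 1)).foldl (fun t s =>       -- for s in range(1, n)
    let delta := getDeltaA s
    (List.range (n - s)).foldl (fun t i =>                 -- for i in range(0, n-s)
      let j := s + i
      delta.foldl (fun t d =>                              -- for d in delta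
        let z := get2 t i j
        let zp := lookupA (get2 t i (j - d.2)) (get2 t (i + d.1) j)
        let res := zp.foldl (fun res c => if z.contains c then res else res ++ [c]) z
        set2 t i j res) t) t) t0
  t.map (fun row => row.map (fun cell => String.mk cell))

-- ===== PORT B =====

-- combine: same nested loops as Source B's combine helper
def combineB (sa sb : List Char) : List Char :=
  sa.foldl (fun acc cA =>
    sb.foldl (fun acc cB =>
      let r := multA cA cB
      if acc.contains r then acc else acc ++ [r]) acc) []

-- solve(i, j): Source B's recursion (the memo dict only caches values, it never changes them)
def solveB (cs : List Char) (i j : Nat) : List Char :=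
  if i = j then [cs.getD i ' ']
  else
    (List.range' i (j - i)).attach.foldl (fun res k =>
      let piece := combineB (solveB cs i k.1) (solveB cs (k.1 + 1) j)
      res ++ piece.filter (fun c => !res.contains c)) []
termination_by j - i
decreasing_by
  · have := List.mem_range'_1.mp k.2; omega
  · have := List.mem_range'_1.mp k.2; omega

def fillTable_alt (x : String) : List (List String) :=
  let cs := x.toList
  let n := cs.length
  (List.range n).map (fun i =>
    (List.range n).map (fun j =>
      String.mk (if i ≤ j then solveB cs i j else [])))

-- ===== PRECONDITION & SPEC =====
-- Pre_ excludes exactly the inputs on which Python A raises IndexError in multiply: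
-- some character outside codes 94..99 ('^'..'c') in a string of length ≥ 2.
def Pre_fillTable (x : String) : Prop :=
  x.toList.length ≤ 1 ∨ x.toList.all (fun c => 94 ≤ c.toNat && c.toNat ≤ 99) = true
instance (x : String) : Decidable (Pre_fillTable x) := by unfold Pre_fillTable; infer_instance
def pvWitness_fillTable : String := "abcba"

def Spec_fillTable (x : String) (out : List (List String)) : Prop := out = fillTable_alt x
instance (x : String) (out : List (List String)) : Decidable (Spec_fillTable x out) := by unfold Spec_fillTable; infer_instance

-- ===== CLAIM (what is proved, stated in full; the proofs are below) =====
def Claim_equal_fillTable : Prop := ∀ (x : String), Dom_fillTable x → Pre_fillTable x → Spec_fillTable x (fillTable x)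

-- ===== LEMMAS AND PROOFS =====

-- the n×n grid determined by a cell function
def grid (n : Nat) (f : Nat → Nat → List Char) : List (List (List Char)) :=
  (List.range n).map (fun i => (List.range n).map (f i))

def upd (f : Nat → Nat → List Char) (i j : Nat) (v : List Char) : Nat → Nat → List Char :=
  fun a b => if a = i ∧ b = j then v else f a b

lemma grid_congr {n : Nat} {f g : Nat → Nat → List Char}
    (h : ∀ a < n, ∀ b < n, f a b = g a b) : grid n f = grid n g := by
  unfold grid
  refine List.map_congr_left (fun a ha => ?_)
  exact List.map_congr_left (fun b hb => h a (List.mem_range.mp ha) b (List.mem_range.mp hb))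

lemma getD_map_range {α : Type} (n i : Nat) (h : i < n) (f : Nat → α) (d : α) :
    ((List.range n).map f).getD i d = f i := by
  rw [List.getD_eq_getElem?_getD]
  simp [h]

lemma set_map_range {α : Type} (n i : Nat) (_h : i < n) (f : Nat → α) (v : α) :
    ((List.range n).map f).set i v = (List.range n).map (fun m => if m = i then v else f m) := by
  apply List.ext_getElem
  · simp
  · intro m hm hm'
    simp only [List.getElem_set, List.getElem_map, List.getElem_range]
    split_ifs with h1 h2 <;> first | rfl | omega

lemma get2_grid {n : Nat} (f : Nat → Nat → List Char) {i j : Nat} (hi : i < n) (hj : j < n) :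
    get2 (grid n f) i j = f i j := by
  unfold get2 grid
  rw [getD_map_range n i hi, getD_map_range n j hj]

lemma set2_grid {n : Nat} (f : Nat → Nat → List Char) {i j : Nat} (hi : i < n) (hj : j < n)
    (v : List Char) : set2 (grid n f) i j v = grid n (upd f i j v) := by
  unfold set2 grid
  rw [getD_map_range n i hi, set_map_range n j hj, set_map_range n i hi]
  refine List.map_congr_left (fun a _ => ?_)
  by_cases ha : a = i
  · subst ha
    simp only []
    refine List.map_congr_left (fun b _ => ?_)
    unfold upd
    by_cases hb : b = j <;> simp [hb]
  · simp only [if_neg ha]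
    refine List.map_congr_left (fun b _ => ?_)
    unfold upd
    simp [ha]

lemma lookupA_eq_combineB : lookupA = combineB := rfl

lemma solveB_self (cs : List Char) (i : Nat) : solveB cs i i = [cs.getD i ' '] := by
  rw [solveB]; rw [if_pos rfl]

-- append-if-absent char loop (membership tested against the constant z)
lemma foldl_skip_append (z : List Char) (l : List Char) (acc : List Char) :
    l.foldl (fun r c => if z.contains c then r else r ++ [c]) acc
      = acc ++ l.filter (fun c => !z.contains c) := by
  induction l generalizing acc with
  | nil => simp
  | cons c l ih =>
    simp only [List.foldl_cons, List.filter_cons]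
    by_cases h : z.contains c
    · simp only [h, if_pos, Bool.not_true]
      rw [ih]; simp
    · simp only [h, Bool.not_false]
      rw [ih]
      simp

-- the merged string produced by one split point
def mergeStr (z piece : List Char) : List Char := z ++ piece.filter (fun c => !z.contains c)

-- getDelta's explicit value
lemma getDeltaA_eq (s : Nat) :
    getDeltaA s = (List.range' 1 s).map (fun k => (k, s + 1 - k)) := by
  unfold getDeltaA
  rw [PySem.List.foldl_append_singleton_eq_map]
  simp


-- A's three loop bodies as named step functions (definitionally the lambdas in fillTable)
def dstepF (i j : Nat) (t : List (List (List Char))) (d : Nat × Nat) : List (List (List Char)) :=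
  set2 t i j ((lookupA (get2 t i (j - d.2)) (get2 t (i + d.1) j)).foldl
    (fun res c => if (get2 t i j).contains c then res else res ++ [c]) (get2 t i j))

def istepF (s : Nat) (t : List (List (List Char))) (i : Nat) : List (List (List Char)) :=
  (getDeltaA s).foldl (dstepF i (s + i)) t

def ostepF (n : Nat) (t : List (List (List Char))) (s : Nat) : List (List (List Char)) :=
  (List.range (n - s)).foldl (istepF s) t

lemma fillTable_show (x : String) :
    fillTable x = ((List.range' 1 (x.toList.length - 1)).foldl (ostepF x.toList.length)
      (initTableA x.toList x.toList.length)).map (fun row => row.map (fun cell => String.mk cell)) := rfl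

-- the cell contents of A's table: diagonal filled, spans < s solved, span s solved up to row i
def gCell (cs : List Char) (s i : Nat) (a b : Nat) : List Char :=
  if a = b then [cs.getD a ' ']
  else if a < b ∧ (b - a < s ∨ (b - a = s ∧ a < i)) then solveB cs a b else []

lemma upd_point (g : Nat → Nat → List Char) {i j : Nat} (v : List Char)
    {a b : Nat} (h : ¬(a = i ∧ b = j)) : upd g i j v a b = g a b := by
  unfold upd; rw [if_neg h]

lemma upd_self (g : Nat → Nat → List Char) (i j : Nat) (v : List Char) :
    upd g i j v i j = v := by unfold upd; rw [if_pos ⟨rfl, rfl⟩]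

-- the inner d-loop, lifted to the string accumulator
lemma dfold_grid {n : Nat} (g : Nat → Nat → List Char) {i j s : Nat}
    (hi : i < n) (hj : j < n) (hjs : j = s + i)
    (ds : List (Nat × Nat)) (hds : ∀ d ∈ ds, 1 ≤ d.1 ∧ d.1 ≤ s ∧ d.2 = s + 1 - d.1)
    (z : List Char) :
    ds.foldl (dstepF i j) (grid n (upd g i j z))
      = grid n (upd g i j (ds.foldl
          (fun z d => mergeStr z (lookupA (g i (j - d.2)) (g (i + d.1) j))) z)) := by
  induction ds generalizing z with
  | nil => rfl
  | cons d ds ih =>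
    obtain ⟨h1, h2, h3⟩ := hds d (List.mem_cons_self ..)
    simp only [List.foldl_cons]
    have hz : get2 (grid n (upd g i j z)) i j = z := by
      rw [get2_grid _ hi hj, upd_self]
    have hr1 : get2 (grid n (upd g i j z)) i (j - d.2) = g i (j - d.2) := by
      rw [get2_grid _ hi (by omega), upd_point _ _ (by omega)]
    have hr2 : get2 (grid n (upd g i j z)) (i + d.1) j = g (i + d.1) j := by
      rw [get2_grid _ (by omega) hj, upd_point _ _ (by omega)]
    unfold dstepF
    rw [hz, hr1, hr2, foldl_skip_append, set2_grid _ hi hj]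
    have hcollapse : grid n (upd (upd g i j z) i j (mergeStr z (lookupA (g i (j - d.2)) (g (i + d.1) j))))
        = grid n (upd g i j (mergeStr z (lookupA (g i (j - d.2)) (g (i + d.1) j)))) := by
      refine grid_congr (fun a _ b _ => ?_)
      unfold upd; split_ifs <;> rfl
    rw [show (z ++ List.filter (fun c => !z.contains c) (lookupA (g i (j - d.2)) (g (i + d.1) j)))
          = mergeStr z (lookupA (g i (j - d.2)) (g (i + d.1) j)) from rfl]
    rw [hcollapse]
    exact ih (fun d hd => hds d (List.mem_cons_of_mem _ hd)) _

-- the string accumulated over the whole delta list is solveB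
lemma sfold_eq_solveB (cs : List Char) {n : Nat} (g : Nat → Nat → List Char) {i j s : Nat}
    (hi : i < n) (hj : j < n) (hij : i < j) (hjs : j = s + i)
    (hg : ∀ a b, a < n → b < n → a ≤ b → b - a < s → g a b = solveB cs a b) :
    (getDeltaA s).foldl
        (fun z d => mergeStr z (lookupA (g i (j - d.2)) (g (i + d.1) j))) []
      = solveB cs i j := by
  rw [getDeltaA_eq, List.foldl_map]
  rw [solveB]
  rw [if_neg (by omega : ¬ i = j)]
  rw [List.foldl_attach (l := List.range' i (j - i)) (b := ([] : List Char))
    (f := fun res k => res ++ (combineB (solveB cs i k) (solveB cs (k + 1) j)).filter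
      (fun c => !res.contains c))]
  have hji : j - i = s := by omega
  rw [hji]
  rw [List.range'_eq_map_range (s := 1) (n := s), List.range'_eq_map_range (s := i) (n := s),
    List.foldl_map, List.foldl_map]
  apply PySem.List.foldl_congr_mem
  intro acc m hm
  have hms : m < s := List.mem_range.mp hm
  have e1 : j - (s + 1 - (1 + m)) = i + m := by omega
  have e2 : i + (1 + m) = i + m + 1 := by omega
  rw [e1, e2]
  have hg1 : g i (i + m) = solveB cs i (i + m) := hg _ _ hi (by omega) (by omega) (by omega)
  rw [hg1]
  have hg2' : g (i + m + 1) j = solveB cs (i + m + 1) j := hg _ _ (by omega) hj (by omega) (by omega)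
  rw [hg2', lookupA_eq_combineB]
  rfl

-- one pass of the i-loop at width s fills cell (i, s+i)
lemma ifold_grid (cs : List Char) {n s : Nat} (hs : 1 ≤ s) (hsn : s < n) :
    ∀ m, m ≤ n - s →
      (List.range m).foldl (istepF s) (grid n (gCell cs s 0)) = grid n (gCell cs s m) := by
  intro m
  induction m with
  | zero => intro _; rfl
  | succ m ih =>
    intro hm
    rw [List.range_succ, List.foldl_append, ih (by omega)]
    simp only [List.foldl_cons, List.foldl_nil]
    unfold istepF
    have hj : s + m < n := by omega
    have hstart : grid n (gCell cs s m) = grid n (upd (gCell cs s m) m (s + m) []) := by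
      refine grid_congr (fun a _ b _ => ?_)
      unfold upd
      split_ifs with h
      · obtain ⟨rfl, rfl⟩ := h
        unfold gCell
        rw [if_neg (by omega), if_neg (by omega)]
      · rfl
    rw [hstart, dfold_grid (gCell cs s m) (by omega) hj rfl _ ?hds]
    case hds =>
      intro d hd
      rw [getDeltaA_eq] at hd
      obtain ⟨k, hk, rfl⟩ := List.mem_map.mp hd
      have := List.mem_range'_1.mp hk
      exact ⟨by omega, by omega, rfl⟩
    rw [sfold_eq_solveB cs (gCell cs s m) (by omega) hj (by omega) rfl ?hg]
    case hg =>
      intro a b _ _ hab hspan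
      unfold gCell
      by_cases h : a = b
      · subst h; rw [if_pos rfl, solveB_self]
      · rw [if_neg h, if_pos ⟨by omega, Or.inl hspan⟩]
    refine grid_congr (fun a _ b _ => ?_)
    unfold upd gCell
    by_cases h : a = m ∧ b = s + m
    · obtain ⟨rfl, rfl⟩ := h
      rw [if_pos ⟨rfl, rfl⟩]
      split_ifs with hd hc
      · exact absurd hd (by omega)
      · rfl
      · exact absurd ⟨by omega, Or.inr ⟨by omega, by omega⟩⟩ hc
    · rw [if_neg h]
      by_cases hd : a = b
      · rw [if_pos hd, if_pos hd]
      · rw [if_neg hd, if_neg hd]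
        by_cases hc : a < b ∧ (b - a < s ∨ (b - a = s ∧ a < m + 1))
        · have hc' : a < b ∧ (b - a < s ∨ (b - a = s ∧ a < m)) := by
            obtain ⟨h1, h2⟩ := hc
            refine ⟨h1, ?_⟩
            rcases h2 with h2 | ⟨h2, h3⟩
            · exact Or.inl h2
            · rcases Nat.lt_succ_iff_lt_or_eq.mp h3 with h4 | rfl
              · exact Or.inr ⟨h2, h4⟩
              · exact absurd ⟨rfl, by omega⟩ h
          rw [if_pos hc', if_pos hc]
        · have hc' : ¬(a < b ∧ (b - a < s ∨ (b - a = s ∧ a < m))) := by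
            rintro ⟨h1, h2 | ⟨h2, h3⟩⟩
            · exact hc ⟨h1, Or.inl h2⟩
            · exact hc ⟨h1, Or.inr ⟨h2, by omega⟩⟩
          rw [if_neg hc', if_neg hc]

-- the s-loop: after widths 1..m every span ≤ m is solved
lemma ofold_grid (cs : List Char) {n : Nat} :
    ∀ m, m ≤ n - 1 →
      (List.range' 1 m).foldl (ostepF n) (grid n (gCell cs 1 0)) = grid n (gCell cs (m + 1) 0) := by
  intro m
  induction m with
  | zero => intro _; rfl
  | succ m ih =>
    intro hm
    rw [List.range'_concat, List.foldl_append, ih (by omega)]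
    simp only [List.foldl_cons, List.foldl_nil]
    unfold ostepF
    have hs : 1 + 1 * m = m + 1 := by omega
    rw [hs]
    have hsn : m + 1 < n := by omega
    rw [ifold_grid cs (by omega) hsn (n - (m + 1)) (le_refl _)]
    refine grid_congr (fun a ha b hb => ?_)
    unfold gCell
    split_ifs <;> first | rfl | omega

-- initTable builds the diagonal grid
lemma initTableA_eq (cs : List Char) (n : Nat) :
    initTableA cs n = grid n (gCell cs 1 0) := by
  unfold initTableA
  have main : ∀ m, m ≤ n →
      (List.range m).foldl (fun t i => set2 t i i [cs.getD i ' '])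
          (grid n (fun _ _ => []))
        = grid n (fun a b => if a = b ∧ a < m then [cs.getD a ' '] else []) := by
    intro m
    induction m with
    | zero =>
      intro _
      refine (grid_congr (fun a _ b _ => ?_)).symm
      rw [if_neg (by omega)]
    | succ m ih =>
      intro hm
      rw [List.range_succ, List.foldl_append, ih (by omega)]
      simp only [List.foldl_cons, List.foldl_nil]
      rw [set2_grid _ (by omega) (by omega)]
      refine grid_congr (fun a _ b _ => ?_)
      unfold upd
      by_cases h : a = m ∧ b = m
      · obtain ⟨rfl, rfl⟩ := h
        rw [if_pos ⟨rfl, rfl⟩, if_pos ⟨rfl, by omega⟩]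
      · rw [if_neg h]
        rw [show (fun a b => if a = b ∧ a < m then [cs.getD a ' '] else ([] : List Char)) a b
              = if a = b ∧ a < m then [cs.getD a ' '] else [] from rfl]
        by_cases h2 : a = b ∧ a < m
        · rw [if_pos h2, if_pos ⟨h2.1, by omega⟩]
        · rw [if_neg h2]
          have h3 : ¬(a = b ∧ a < m + 1) := by
            rintro ⟨rfl, hlt⟩
            rcases Nat.lt_succ_iff_lt_or_eq.mp hlt with h4 | rfl
            · exact h2 ⟨rfl, h4⟩
            · exact h ⟨rfl, rfl⟩
          rw [if_neg h3]
  have h0 : (List.range n).map (fun _ => (List.range n).map (fun _ => ([] : List Char)))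
      = grid n (fun _ _ => []) := rfl
  rw [h0, main n (le_refl n)]
  refine grid_congr (fun a ha b _ => ?_)
  unfold gCell
  by_cases h : a = b
  · subst h
    rw [if_pos ⟨rfl, ha⟩, if_pos rfl]
  · rw [if_neg (fun hc => h hc.1), if_neg h, if_neg (by omega)]

lemma fillTable_alt_show (x : String) :
    fillTable_alt x = (List.range x.toList.length).map (fun i =>
      (List.range x.toList.length).map (fun j =>
        String.mk (if i ≤ j then solveB x.toList i j else []))) := rfl

lemma fillTable_eq (x : String) : fillTable x = fillTable_alt x := by
  rw [fillTable_show, fillTable_alt_show, initTableA_eq,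
    ofold_grid x.toList (x.toList.length - 1) (le_refl _)]
  unfold grid
  rw [List.map_map]
  refine List.map_congr_left (fun a ha => ?_)
  simp only [Function.comp]
  rw [List.map_map]
  refine List.map_congr_left (fun b hb => ?_)
  simp only [Function.comp]
  have han := List.mem_range.mp ha
  have hbn := List.mem_range.mp hb
  congr 1
  unfold gCell
  by_cases h : a = b
  · subst h
    rw [if_pos rfl, if_pos (le_refl a), solveB_self]
  · rw [if_neg h]
    by_cases hab : a < b
    · rw [if_pos ⟨hab, Or.inl (by omega)⟩, if_pos (Nat.le_of_lt hab)]
    · rw [if_neg (fun hc => hab hc.1), if_neg (by omega)]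

-- ===== VERDICT (by name: the statement is the Claim_ definition above) =====
theorem fillTable_spec : Claim_equal_fillTable := by
  intro x _ _
  unfold Spec_fillTable
  exact fillTable_eq x
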